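-- pv_equiv track=rewrite | github.com/nds/mettannotator | bin/add_hypothetical_protein_descriptions.py | insert_product_source
-- ===== SOURCE A (Python) =====
-- def insert_product_source(my_dict, source):
--     keys_list = list(my_dict.keys())
--     product_index = keys_list.index("product")
--     return (
--         {k: my_dict[k] for k in keys_list[: product_index + 1]}
--         | {"product_source": source}
--         | {k: my_dict[k] for k in keys_list[product_index + 1 :]}
--     )
-- ===== SOURCE B (Python) =====
-- def insert_product_source(my_dict, source):
--     result = {}
--     found = False
--     for k, v in my_dict.items():
--         result[k] = v
--         if k == "product":
--             result["product_source"] = source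
--             found = True
--     if not found:
--         raise ValueError("'product' is not in list")
--     return result
-- ===== Notes on version B (the rewrite author's own statement) =====
-- stated objective: simpler
-- what changed: Replaces A's index-of-'product' plus three-dict slice-and-merge rebuild by a single streaming pass over the items that copies each entry and drops in 'product_source' right after the 'product' key, raising the same ValueError via a found flag when 'product' is absent.
import Mathlib
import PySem

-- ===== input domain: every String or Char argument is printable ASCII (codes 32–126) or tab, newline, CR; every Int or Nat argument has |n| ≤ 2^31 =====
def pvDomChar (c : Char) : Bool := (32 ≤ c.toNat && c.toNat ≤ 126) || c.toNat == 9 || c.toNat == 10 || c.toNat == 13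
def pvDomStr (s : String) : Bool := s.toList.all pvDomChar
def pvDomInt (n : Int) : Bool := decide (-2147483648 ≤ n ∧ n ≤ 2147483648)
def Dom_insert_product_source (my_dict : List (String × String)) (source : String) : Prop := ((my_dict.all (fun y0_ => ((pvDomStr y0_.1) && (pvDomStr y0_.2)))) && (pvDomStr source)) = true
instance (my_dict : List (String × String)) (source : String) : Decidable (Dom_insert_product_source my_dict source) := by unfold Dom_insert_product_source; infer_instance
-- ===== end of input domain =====

-- B replaces A's index+three-slice dict rebuild by one streaming copy pass (objective: simpler).

-- ===== PORT A =====
-- A: find the index of "product" in the key list, then merge three dicts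
--    (prefix comprehension | {"product_source": source} | suffix comprehension).
def insert_product_source (my_dict : List (String × String)) (source : String) : List (String × String) :=
  let d := PySem.Dict.ofList my_dict
  let keys_list := d.keys
  match PySem.List.index? keys_list "product" with
  | none => []   -- keys_list.index("product") raises ValueError; excluded by Pre_
  | some product_index =>
    let c1 := (PySem.List.slice keys_list none (some ((product_index : Int) + 1))).foldl
      (fun a k => a.insert k (d.getD k "")) PySem.Dict.empty
    let c2 := (PySem.List.slice keys_list (some ((product_index : Int) + 1)) none).foldl
      (fun a k => a.insert k (d.getD k "")) PySem.Dict.empty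
    ((c1.update [("product_source", source)]).update c2.items).items

-- ===== PORT B =====
-- B: one pass over the items; copy each pair, and right after copying the
--    "product" key also set "product_source"; a found flag mirrors the ValueError.
def insert_product_source_alt (my_dict : List (String × String)) (source : String) : List (String × String) :=
  let d := PySem.Dict.ofList my_dict
  let st := d.items.foldl
    (fun (st : PySem.Dict String String × Bool) kv =>
      let r := st.1.insert kv.1 kv.2
      if kv.1 == "product" then (r.insert "product_source" source, true) else (r, st.2))
    (PySem.Dict.empty, false)
  if st.2 then st.1.items else []   -- not found: raise ValueError; excluded by Pre_

-- ===== PRECONDITION & SPEC =====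
-- Pre_ excludes exactly the inputs where "product" is not a key: there both A and B raise ValueError.
def Pre_insert_product_source (my_dict : List (String × String)) (source : String) : Prop :=
  "product" ∈ my_dict.map Prod.fst
instance (my_dict : List (String × String)) (source : String) : Decidable (Pre_insert_product_source my_dict source) := by unfold Pre_insert_product_source; infer_instance
def pvWitness_insert_product_source : (List (String × String)) × String := ([("product", "x"), ("name", "y")], "src")

def Spec_insert_product_source (my_dict : List (String × String)) (source : String) (out : List (String × String)) : Prop := out = insert_product_source_alt my_dict source
instance (my_dict : List (String × String)) (source : String) (out : List (String × String)) : Decidable (Spec_insert_product_source my_dict source out) := by unfold Spec_insert_product_source; infer_instance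

-- ===== CLAIM (what is proved, stated in full; the proofs are below) =====
def Claim_equal_insert_product_source : Prop := ∀ (my_dict : List (String × String)) (source : String), Dom_insert_product_source my_dict source → Pre_insert_product_source my_dict source → Spec_insert_product_source my_dict source (insert_product_source my_dict source)

-- ===== LEMMAS AND PROOFS =====

-- B's loop over pairs none of whose keys is "product" just inserts, preserving the flag.
theorem pv_fold_no_product (source : String) (ps : List (String × String))
    (h : ∀ p ∈ ps, p.1 ≠ "product") (st : PySem.Dict String String × Bool) :
    ps.foldl
      (fun (st : PySem.Dict String String × Bool) kv =>
        let r := st.1.insert kv.1 kv.2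
        if kv.1 == "product" then (r.insert "product_source" source, true) else (r, st.2)) st
    = (ps.foldl (fun a p => a.insert p.1 p.2) st.1, st.2) := by
  induction ps generalizing st with
  | nil => rfl
  | cons p ps ih =>
    have hp : p.1 ≠ "product" := h p (List.mem_cons_self ..)
    simp only [List.foldl_cons]
    rw [if_neg (by simpa using hp)]
    exact ih (fun q hq => h q (List.mem_cons_of_mem _ hq)) _

theorem insert_product_source_spec_aux (my_dict : List (String × String)) (source : String)
    (hpre : Pre_insert_product_source my_dict source) :
    insert_product_source my_dict source = insert_product_source_alt my_dict source := by
  unfold insert_product_source insert_product_source_alt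
  set d := PySem.Dict.ofList my_dict with hd
  -- keys of d are the distinct keys of my_dict, nodup
  have hnodup : d.keys.Nodup := PySem.Dict.nodup_keys_ofList my_dict
  have hkeys : d.keys = PySem.Set.ofList (my_dict.map Prod.fst) := by
    rw [hd]
    show (my_dict.foldl (fun a p => a.insert p.1 p.2) PySem.Dict.empty).keys = _
    rw [PySem.Dict.keys_foldl_insert_key my_dict Prod.fst (fun _ p => p.2) PySem.Dict.empty]
    simp [PySem.Dict.keys_empty, PySem.Set.update_nil_left]
  have hmem : "product" ∈ d.keys := by
    rw [hkeys, PySem.Set.mem_ofList]; exact hpre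
  obtain ⟨pi, hpi⟩ := (PySem.List.index?_isSome_iff d.keys "product").2 hmem |> Option.isSome_iff_exists.1
  obtain ⟨pre, suf, hsplit, hlen, hnp⟩ := (PySem.List.index?_eq_some_iff d.keys "product" pi).1 hpi
  -- "product" not in suf either, by nodup
  have hns : "product" ∉ suf := by
    rw [hsplit] at hnodup
    have := (List.nodup_append.1 hnodup).2.1
    exact fun h => (List.nodup_cons.1 this).1 h
  have hsufnd : suf.Nodup := by
    rw [hsplit] at hnodup
    exact (List.nodup_cons.1 (List.nodup_append.1 hnodup).2.1).2
  simp only [hpi]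
  -- slices
  have hcast : (pi : Int) + 1 = ((pi + 1 : Nat) : Int) := by push_cast; ring
  have hsl1 : PySem.List.slice d.keys none (some ((pi : Int) + 1)) = pre ++ ["product"] := by
    rw [hcast, PySem.List.slice_to_natCast, hsplit, ← hlen]
    rw [List.take_append]
    simp
  have hsl2 : PySem.List.slice d.keys (some ((pi : Int) + 1)) none = suf := by
    rw [hcast, PySem.List.slice_from_natCast, hsplit, ← hlen]
    rw [List.drop_append]
    simp
  -- c2's items: fresh distinct keys into empty append
  have hc2 : (suf.foldl (fun a k => a.insert k (d.getD k "")) PySem.Dict.empty).items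
      = suf.map (fun k => (k, d.getD k "")) := by
    have := PySem.Dict.items_foldl_insert_fresh (l := suf) (k := fun x => x)
      (v := fun k => d.getD k "") (d := PySem.Dict.empty)
      (by intro a _; exact PySem.Dict.contains_empty a) (by simpa using hsufnd)
    simpa using this
  -- d.items = d.keys.map (fun k => (k, d.getD k ""))
  have hitems : d.items = d.keys.map (fun k => (k, d.getD k "")) :=
    PySem.Dict.items_eq_map_keys d hnodup ""
  rw [hsl1, hsl2]
  simp only [hc2, hitems, hsplit]
  -- B side: unfold the fold over pre ++ "product" :: suf
  have hpre_ne : ∀ p ∈ pre.map (fun k => (k, d.getD k "")), p.1 ≠ "product" := by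
    intro p hp
    obtain ⟨k, hk, rfl⟩ := List.mem_map.1 hp
    exact fun h => hnp (h ▸ hk)
  have hsuf_ne : ∀ p ∈ suf.map (fun k => (k, d.getD k "")), p.1 ≠ "product" := by
    intro p hp
    obtain ⟨k, hk, rfl⟩ := List.mem_map.1 hp
    exact fun h => hns (h ▸ hk)
  simp only [List.map_append, List.map_cons, List.foldl_append, List.foldl_cons]
  rw [pv_fold_no_product source _ hpre_ne]
  simp only [BEq.rfl, if_pos]
  rw [pv_fold_no_product source _ hsuf_ne]
  simp only [PySem.Dict.update, List.foldl_map, List.foldl_cons, List.foldl_nil, if_true]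

-- ===== VERDICT (by name: the statement is the Claim_ definition above) =====
theorem insert_product_source_spec : Claim_equal_insert_product_source := by
  intro my_dict source _ hpre
  exact insert_product_source_spec_aux my_dict source hpre
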